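-- pv_equiv track=rewrite | github.com/ioaksenenko/neural_networks | 3_tagging_submasks_maker/datamaker/type_1/main.py | number_input_question_generate
-- ===== SOURCE A (Python) =====
-- def number_input_question_generate(n=1):
--     inputs = []
--     outputs = []
--     input = ['___T____']
--     output = ['[item]T[/item]']
--     for _ in range(2 * n):
--         input.append('________')
--     for i in range(n):
--         input[0] += '___________' + '________'
--         output.append('[numberinput][answer]T[/answer][/numberinput]')
--         output.append('T')
--         for j in range(n):
--             if j == i:
--                 input[2 * j + 1] += '___{#T}____' + '________'
--                 input[2 * j + 2] += '___________' + '___T____'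
--             else:
--                 input[2 * j + 1] += '___________' + '________'
--                 input[2 * j + 2] += '___________' + '________'
--     #inputs.append([re.sub(r'_+', '_', el) for el in input])
--     inputs.append(input)
--     outputs.append(output)
--     #inputs.append([re.sub(r'_+', '_', el) for el in input[0:len(input) - 1]])
--     inputs.append([el[:len(el) - 8] for el in input][:len(input) - 1])
--     outputs.append(output[:len(output) - 1])
--     return inputs, outputs
-- ===== SOURCE B (Python) =====
-- def number_input_question_generate(n=1):
--     # Closed-form positional construction: each row is built directly from its
--     # index instead of being grown column-by-column in nested loops.
--     input_rows = ['___T____' + '_' * (19 * n)] + [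
--         '________' + '_' * (19 * j) + block + '_' * (19 * (n - 1 - j))
--         for j in range(n)
--         for block in ('___{#T}____' + '________', '___________' + '___T____')
--     ]
--     output_rows = ['[item]T[/item]'] + ['[numberinput][answer]T[/answer][/numberinput]', 'T'] * n
--     inputs = [input_rows, [row[:len(row) - 8] for row in input_rows[:len(input_rows) - 1]]]
--     outputs = [output_rows, output_rows[:len(output_rows) - 1]]
--     return inputs, outputs
-- ===== Notes on version B (the rewrite author's own statement) =====
-- stated objective: simpler
-- what changed: B computes each row directly by closed-form positional placement (fixed prefix + 19-char padding per earlier column + the diagonal block + padding per later column) and the output list by list repetition, replacing A's column-by-column nested loops that grow every row in place.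
import Mathlib
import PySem

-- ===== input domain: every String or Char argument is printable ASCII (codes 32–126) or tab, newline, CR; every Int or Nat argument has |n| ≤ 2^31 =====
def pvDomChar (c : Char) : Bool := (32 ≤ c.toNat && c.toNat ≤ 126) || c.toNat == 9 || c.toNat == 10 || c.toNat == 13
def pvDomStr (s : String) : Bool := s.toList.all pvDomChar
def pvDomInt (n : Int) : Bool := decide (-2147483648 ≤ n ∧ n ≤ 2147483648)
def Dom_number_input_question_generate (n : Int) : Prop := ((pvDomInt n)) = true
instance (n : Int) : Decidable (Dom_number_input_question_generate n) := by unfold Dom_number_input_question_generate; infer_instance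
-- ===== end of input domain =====

-- B builds each row directly by closed-form positional placement instead of A's
-- column-by-column nested in-place appends (objective: simpler).

-- ===== PORT A =====
-- A-side helpers: the two loop bodies of A, as named functions.
-- `input[k] += s` is ported as set k (getD k "" ++ s); exact here because every
-- index A touches is in range (list length 1+2n, indices 0, 2j+1, 2j+2 with j < n).
def pvInnerBody (i : Int) (inp : List String) (j : Int) : List String :=
  if j == i then
    let inp := inp.set (2*j+1).toNat ((inp.getD (2*j+1).toNat "") ++ ("___{#T}____" ++ "________"))
    inp.set (2*j+2).toNat ((inp.getD (2*j+2).toNat "") ++ ("___________" ++ "___T____"))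
  else
    let inp := inp.set (2*j+1).toNat ((inp.getD (2*j+1).toNat "") ++ ("___________" ++ "________"))
    inp.set (2*j+2).toNat ((inp.getD (2*j+2).toNat "") ++ ("___________" ++ "________"))

def pvOuterBody (n : Int) (st : List String × List String) (i : Int) : List String × List String :=
  let input := st.1.set 0 ((st.1.getD 0 "") ++ ("___________" ++ "________"))
  let output := (st.2 ++ ["[numberinput][answer]T[/answer][/numberinput]"]) ++ ["T"]
  let input := (PySem.List.pyRange 0 n 1).foldl (pvInnerBody i) input
  (input, output)

def number_input_question_generate (n : Int) : List (List String) × List (List String) :=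
  let input : List String := ["___T____"]
  let output : List String := ["[item]T[/item]"]
  let input := (PySem.List.pyRange 0 (2*n) 1).foldl (fun acc _ => acc ++ ["________"]) input
  let st := (PySem.List.pyRange 0 n 1).foldl (pvOuterBody n) (input, output)
  let input := st.1
  let output := st.2
  let inputs := [input,
    PySem.List.slice (input.map (fun el => PySem.Str.slice el none (some (PySem.Str.len el - 8))))
      none (some ((input.length : Int) - 1))]
  let outputs := [output, PySem.List.slice output none (some ((output.length : Int) - 1))]
  (inputs, outputs)

-- ===== PORT B =====
-- hand port of Python string repetition `s * k` (exact: k ≤ 0 gives "")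
def pyStrMulNat (s : String) : Nat → String
  | 0 => ""
  | m + 1 => pyStrMulNat s m ++ s
def pyStrMul (s : String) (k : Int) : String := pyStrMulNat s k.toNat
-- hand port of Python list repetition `xs * k` (exact: k ≤ 0 gives [])
def pyListMul (xs : List String) (k : Int) : List String := (List.replicate k.toNat xs).flatten

def number_input_question_generate_alt (n : Int) : List (List String) × List (List String) :=
  let inputRows : List String :=
    ["___T____" ++ pyStrMul "_" (19 * n)] ++
    (PySem.List.pyRange 0 n 1).flatMap (fun j =>
      [ "________" ++ pyStrMul "_" (19 * j) ++ ("___{#T}____" ++ "________") ++ pyStrMul "_" (19 * (n - 1 - j)),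
        "________" ++ pyStrMul "_" (19 * j) ++ ("___________" ++ "___T____") ++ pyStrMul "_" (19 * (n - 1 - j)) ])
  let outputRows : List String :=
    ["[item]T[/item]"] ++ pyListMul ["[numberinput][answer]T[/answer][/numberinput]", "T"] n
  let inputs := [inputRows,
    (PySem.List.slice inputRows none (some ((inputRows.length : Int) - 1))).map
      (fun row => PySem.Str.slice row none (some (PySem.Str.len row - 8)))]
  let outputs := [outputRows, PySem.List.slice outputRows none (some ((outputRows.length : Int) - 1))]
  (inputs, outputs)

-- ===== PRECONDITION & SPEC =====
def Spec_number_input_question_generate (n : Int) (out : List (List String) × List (List String)) : Prop := out = number_input_question_generate_alt n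
instance (n : Int) (out : List (List String) × List (List String)) : Decidable (Spec_number_input_question_generate n out) := by unfold Spec_number_input_question_generate; infer_instance

-- ===== CLAIM (what is proved, stated in full; the proofs are below) =====
def Claim_equal_number_input_question_generate : Prop := ∀ (n : Int), Dom_number_input_question_generate n → Spec_number_input_question_generate n (number_input_question_generate n)

-- ===== LEMMAS AND PROOFS =====

def pvPlain : String := "___________" ++ "________"
def pvS1 : String := "___{#T}____" ++ "________"
def pvS2 : String := "___________" ++ "___T____"
def pvO1 : String := "[numberinput][answer]T[/answer][/numberinput]"

-- the interleaved row list: pair j of rows sits at positions 2j, 2j+1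
def pvRows (f g : Nat → String) (N : Nat) : List String :=
  (List.range N).flatMap (fun j => [f j, g j])

theorem pvRows_succ_left (f g : Nat → String) (N : Nat) :
    pvRows f g (N+1) = f 0 :: g 0 :: pvRows (fun j => f (j+1)) (fun j => g (j+1)) N := by
  simp [pvRows, List.range_succ_eq_map, List.flatMap_map]

theorem pvRows_congr {f g f' g' : Nat → String} {N : Nat}
    (h : ∀ j < N, f j = f' j ∧ g j = g' j) : pvRows f g N = pvRows f' g' N := by
  induction N generalizing f g f' g' with
  | zero => rfl
  | succ K ih =>
    rw [pvRows_succ_left, pvRows_succ_left]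
    have h0 := h 0 (Nat.succ_pos K)
    rw [h0.1, h0.2, ih (fun j hj => h (j+1) (by omega))]

theorem pvRows_getD_fst {f g : Nat → String} {N m : Nat} (h : m < N) :
    (pvRows f g N).getD (2*m) "" = f m := by
  induction m generalizing N f g with
  | zero =>
    obtain ⟨K, rfl⟩ : ∃ K, N = K + 1 := ⟨N - 1, by omega⟩
    rw [pvRows_succ_left]; rfl
  | succ m ih =>
    obtain ⟨K, rfl⟩ : ∃ K, N = K + 1 := ⟨N - 1, by omega⟩
    rw [pvRows_succ_left]
    have h2 : 2*(m+1) = (2*m+1)+1 := by omega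
    rw [h2, List.getD_cons_succ, List.getD_cons_succ]
    exact ih (by omega)

theorem pvRows_getD_snd {f g : Nat → String} {N m : Nat} (h : m < N) :
    (pvRows f g N).getD (2*m+1) "" = g m := by
  induction m generalizing N f g with
  | zero =>
    obtain ⟨K, rfl⟩ : ∃ K, N = K + 1 := ⟨N - 1, by omega⟩
    rw [pvRows_succ_left]; rfl
  | succ m ih =>
    obtain ⟨K, rfl⟩ : ∃ K, N = K + 1 := ⟨N - 1, by omega⟩
    rw [pvRows_succ_left]
    have h2 : 2*(m+1)+1 = (2*m+1+1)+1 := by omega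
    rw [h2, List.getD_cons_succ, List.getD_cons_succ]
    exact ih (by omega)

theorem pvRows_set_fst {f g : Nat → String} {N m : Nat} (x : String) (h : m < N) :
    (pvRows f g N).set (2*m) x = pvRows (fun j => if j = m then x else f j) g N := by
  induction m generalizing N f g with
  | zero =>
    obtain ⟨K, rfl⟩ : ∃ K, N = K + 1 := ⟨N - 1, by omega⟩
    rw [pvRows_succ_left, pvRows_succ_left, Nat.mul_zero, List.set_cons_zero,
        if_pos rfl, pvRows_congr (f' := fun j => if j+1 = 0 then x else f (j+1))
          (g' := fun j => g (j+1)) (fun j hj => ⟨(if_neg (by omega)).symm, rfl⟩)]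
  | succ m ih =>
    obtain ⟨K, rfl⟩ : ∃ K, N = K + 1 := ⟨N - 1, by omega⟩
    rw [pvRows_succ_left, pvRows_succ_left]
    have h2 : 2*(m+1) = ((2*m)+1)+1 := by omega
    rw [h2, List.set_cons_succ, List.set_cons_succ, ih (by omega), if_neg (by omega : ¬ (0 = m+1))]
    refine congrArg _ (congrArg _ (pvRows_congr (fun j hj => ⟨?_, rfl⟩)))
    rcases eq_or_ne j m with hj' | hj'
    · subst hj'; rw [if_pos rfl, if_pos rfl]
    · rw [if_neg hj', if_neg (by omega)]

theorem pvRows_set_snd {f g : Nat → String} {N m : Nat} (y : String) (h : m < N) :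
    (pvRows f g N).set (2*m+1) y = pvRows f (fun j => if j = m then y else g j) N := by
  induction m generalizing N f g with
  | zero =>
    obtain ⟨K, rfl⟩ : ∃ K, N = K + 1 := ⟨N - 1, by omega⟩
    rw [pvRows_succ_left, pvRows_succ_left, Nat.mul_zero, Nat.zero_add, List.set_cons_succ,
        List.set_cons_zero, if_pos rfl, pvRows_congr (f' := fun j => f (j+1))
          (g' := fun j => if j+1 = 0 then y else g (j+1)) (fun j hj => ⟨rfl, (if_neg (by omega)).symm⟩)]
  | succ m ih =>
    obtain ⟨K, rfl⟩ : ∃ K, N = K + 1 := ⟨N - 1, by omega⟩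
    rw [pvRows_succ_left, pvRows_succ_left]
    have h2 : 2*(m+1)+1 = ((2*m+1)+1)+1 := by omega
    rw [h2, List.set_cons_succ, List.set_cons_succ, ih (by omega), if_neg (by omega : ¬ (0 = m+1))]
    refine congrArg _ (congrArg _ (pvRows_congr (fun j hj => ⟨rfl, ?_⟩)))
    rcases eq_or_ne j m with hj' | hj'
    · subst hj'; rw [if_pos rfl, if_pos rfl]
    · rw [if_neg hj', if_neg (by omega)]

-- effect of one pvInnerBody application at column m on the (top :: rows) list
theorem pvInnerBody_eq {i : Int} {top : String} {f g : Nat → String} {N m : Nat} (h : m < N) :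
    pvInnerBody i (top :: pvRows f g N) (m : Int)
    = top :: pvRows (fun j => if j = m then f j ++ (if ((j:Int) == i) then pvS1 else pvPlain) else f j)
                    (fun j => if j = m then g j ++ (if ((j:Int) == i) then pvS2 else pvPlain) else g j) N := by
  have e1 : ((2*(m:Int)+1)).toNat = (2*m)+1 := by omega
  have e2 : ((2*(m:Int)+2)).toNat = ((2*m)+1)+1 := by omega
  have hset : ∀ (b1 b2 : String),
      (((top :: pvRows f g N).set ((2*m)+1)
          (((top :: pvRows f g N).getD ((2*m)+1) "") ++ b1)).set (((2*m)+1)+1)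
        ((((top :: pvRows f g N).set ((2*m)+1)
          (((top :: pvRows f g N).getD ((2*m)+1) "") ++ b1)).getD (((2*m)+1)+1) "") ++ b2))
      = top :: pvRows (fun j => if j = m then f j ++ b1 else f j)
                      (fun j => if j = m then g j ++ b2 else g j) N := by
    intro b1 b2
    rw [List.getD_cons_succ, List.set_cons_succ, pvRows_getD_fst h, pvRows_set_fst _ h,
        List.getD_cons_succ, List.set_cons_succ, pvRows_getD_snd h, pvRows_set_snd _ h]
    refine congrArg _ (pvRows_congr (fun j hj => ⟨?_, ?_⟩)) <;>
      · rcases eq_or_ne j m with hj' | hj'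
        · subst hj'; simp
        · simp [hj']
  by_cases hb : ((m:Int) == i) = true
  · simp only [pvInnerBody, if_pos hb, e1, e2]
    rw [hset]
    refine congrArg _ (pvRows_congr (fun j hj => ⟨?_, ?_⟩)) <;>
      · rcases eq_or_ne j m with hj' | hj'
        · subst hj'; simp [hb, pvS1, pvS2]
        · simp [hj']
  · simp only [pvInnerBody, if_neg hb, e1, e2]
    rw [hset]
    refine congrArg _ (pvRows_congr (fun j hj => ⟨?_, ?_⟩)) <;>
      · rcases eq_or_ne j m with hj' | hj'
        · subst hj'; simp [hb, pvPlain]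
        · simp [hj']

-- the inner loop adds, to every row pair j < m, its column-i block
theorem pvInnerFold (i : Int) (N : Nat) :
    ∀ (m : Nat), m ≤ N → ∀ (f g : Nat → String) (top : String),
    (PySem.List.pyRange 0 (m:Int) 1).foldl (pvInnerBody i) (top :: pvRows f g N)
    = top :: pvRows (fun j => if j < m then f j ++ (if ((j:Int) == i) then pvS1 else pvPlain) else f j)
                    (fun j => if j < m then g j ++ (if ((j:Int) == i) then pvS2 else pvPlain) else g j) N := by
  intro m
  induction m with
  | zero =>
    intro _ f g top
    rw [show ((0:Nat):Int) = 0 from rfl, PySem.List.pyRange_one_eq_nil (le_refl 0), List.foldl_nil]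
    exact congrArg _ (pvRows_congr (fun j hj => ⟨(if_neg (by omega)).symm, (if_neg (by omega)).symm⟩))
  | succ m ih =>
    intro hm f g top
    have hcast : ((m+1 : Nat) : Int) = (m:Int)+1 := by push_cast; ring
    rw [hcast, PySem.List.pyRange_one_succ_right (by positivity), List.foldl_append,
        List.foldl_cons, List.foldl_nil, ih (by omega), pvInnerBody_eq (show m < N by omega)]
    refine congrArg _ (pvRows_congr (fun j hj => ⟨?_, ?_⟩)) <;>
      · rcases Nat.lt_trichotomy j m with hj' | hj' | hj'
        · simp [hj'.ne, hj', (by omega : j < m + 1)]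
        · subst hj'; simp
        · rw [if_neg (by omega : ¬ j = m), if_neg (by omega : ¬ j < m), if_neg (by omega : ¬ j < m + 1)]

-- closed forms for the outer-loop state
def pvTop : Nat → String
  | 0 => "___T____"
  | m+1 => pvTop m ++ pvPlain
def pvAcc (sp : String) (j : Nat) : Nat → String
  | 0 => "________"
  | m+1 => pvAcc sp j m ++ (if j = m then sp else pvPlain)
def pvOut : Nat → List String
  | 0 => ["[item]T[/item]"]
  | m+1 => (pvOut m ++ [pvO1]) ++ ["T"]

theorem pvOuterBody_eq {N : Nat} (i : Int) (top : String) (f g : Nat → String) (out : List String) :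
    pvOuterBody (N:Int) (top :: pvRows f g N, out) i
    = ((top ++ pvPlain) :: pvRows (fun j => f j ++ (if ((j:Int) == i) then pvS1 else pvPlain))
          (fun j => g j ++ (if ((j:Int) == i) then pvS2 else pvPlain)) N,
       (out ++ [pvO1]) ++ ["T"]) := by
  simp only [pvOuterBody, List.getD_cons_zero, List.set_cons_zero]
  rw [pvInnerFold i N N (le_refl N)]
  refine congrArg₂ _ (congrArg _ (pvRows_congr (fun j hj => ⟨?_, ?_⟩))) rfl <;>
    rw [if_pos hj]

theorem pvOuterFold (N : Nat) :
    ∀ m, m ≤ N →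
    (PySem.List.pyRange 0 (m:Int) 1).foldl (pvOuterBody (N:Int))
        ("___T____" :: pvRows (fun _ => "________") (fun _ => "________") N, ["[item]T[/item]"])
    = (pvTop m :: pvRows (fun j => pvAcc pvS1 j m) (fun j => pvAcc pvS2 j m) N, pvOut m) := by
  intro m
  induction m with
  | zero =>
    intro _
    rw [show ((0:Nat):Int) = 0 from rfl, PySem.List.pyRange_one_eq_nil (le_refl 0), List.foldl_nil]
    rfl
  | succ m ih =>
    intro hm
    have hcast : ((m+1 : Nat) : Int) = (m:Int)+1 := by push_cast; ring
    rw [hcast, PySem.List.pyRange_one_succ_right (by positivity), List.foldl_append,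
        List.foldl_cons, List.foldl_nil, ih (by omega), pvOuterBody_eq]
    refine congrArg₂ _ (congrArg₂ _ rfl (pvRows_congr (fun j hj => ⟨?_, ?_⟩))) rfl <;>
      · show _ = pvAcc _ j (m+1)
        rw [pvAcc]
        rcases eq_or_ne j m with hj' | hj'
        · subst hj'; rw [if_pos rfl, if_pos (by simp)]
        · rw [if_neg hj', if_neg (by simp [hj'])]

-- string-repetition arithmetic
theorem pyStrMulNat_add (s : String) (a b : Nat) :
    pyStrMulNat s (a + b) = pyStrMulNat s a ++ pyStrMulNat s b := by
  induction b with
  | zero => rw [pyStrMulNat]; exact String.append_empty.symm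
  | succ b ih => rw [show a + (b+1) = (a+b)+1 from rfl, pyStrMulNat, pyStrMulNat, ih, String.append_assoc]

theorem pvPlain_pow (k : Nat) : pyStrMulNat pvPlain k = pyStrMulNat "_" (19*k) := by
  induction k with
  | zero => rfl
  | succ k ih =>
    rw [pyStrMulNat, ih, show 19*(k+1) = 19*k + 19 by ring, pyStrMulNat_add]
    exact congrArg _ (by decide)

theorem pvAcc_ge (sp : String) (j : Nat) : ∀ m, m ≤ j → pvAcc sp j m = "________" ++ pyStrMulNat pvPlain m := by
  intro m
  induction m with
  | zero => intro _; rw [pvAcc, pyStrMulNat]; exact String.append_empty.symm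
  | succ m ih =>
    intro hm
    rw [pvAcc, ih (by omega), if_neg (by omega), pyStrMulNat, String.append_assoc]

theorem pvAcc_lt (sp : String) (j : Nat) : ∀ m, j < m →
    pvAcc sp j m = (("________" ++ pyStrMulNat pvPlain j) ++ sp) ++ pyStrMulNat pvPlain (m-1-j) := by
  intro m
  induction m with
  | zero => omega
  | succ m ih =>
    intro hm
    rcases eq_or_ne j m with hj | hj
    · subst hj
      rw [pvAcc, pvAcc_ge sp j j (le_refl j), if_pos rfl, show j+1-1-j = 0 by omega, pyStrMulNat]
      exact String.append_empty.symm
    · rw [pvAcc, ih (by omega), if_neg hj, String.append_assoc, ← pyStrMulNat]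
      exact congrArg _ (congrArg _ (by omega))

-- generic loop/list utilities
theorem pvFoldl_snoc {α : Type} (c : String) (l : List α) :
    ∀ init : List String, l.foldl (fun acc _ => acc ++ [c]) init = init ++ List.replicate l.length c := by
  induction l with
  | nil => intro init; simp
  | cons x xs ih =>
    intro init
    rw [List.foldl_cons, ih, List.length_cons, List.replicate_succ, List.append_assoc]
    rfl
  
theorem pvReplicate_rows (c : String) (N : Nat) :
    List.replicate (2*N) c = pvRows (fun _ => c) (fun _ => c) N := by
  induction N with
  | zero => rfl
  | succ N ih =>
    rw [show 2*(N+1) = (2*N)+1+1 by ring, List.replicate_succ, List.replicate_succ, ih,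
        pvRows_succ_left]

theorem pvFlatMap_pyRange (r1 r2 : Int → String) (N : Nat) :
    (PySem.List.pyRange 0 (N:Int) 1).flatMap (fun j => [r1 j, r2 j])
    = pvRows (fun j => r1 (j:Int)) (fun j => r2 (j:Int)) N := by
  rw [PySem.List.pyRange_one]
  simp [pvRows, List.flatMap_map]

theorem pvTop_eq (N : Nat) : pvTop N = "___T____" ++ pyStrMulNat pvPlain N := by
  induction N with
  | zero => exact String.append_empty.symm
  | succ N ih => rw [pvTop, ih, pyStrMulNat, String.append_assoc]

theorem pvOut_eq (N : Nat) : pvOut N = ["[item]T[/item]"] ++ (List.replicate N [pvO1, "T"]).flatten := by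
  induction N with
  | zero => rfl
  | succ N ih =>
    rw [pvOut, ih, List.replicate_succ', List.flatten_append]
    simp

theorem pvMap_slice_pred (f : String → String) (L : List String) (h : 0 < L.length) :
    PySem.List.slice (L.map f) none (some ((L.length : Int) - 1))
    = (PySem.List.slice L none (some ((L.length : Int) - 1))).map f := by
  have e : (L.length : Int) - 1 = ((L.length - 1 : Nat) : Int) := by omega
  rw [e, PySem.List.slice_to_natCast, PySem.List.slice_to_natCast, List.map_take]

-- the whole equivalence at a nonnegative argument
theorem pvMain_nat (N : Nat) :
    number_input_question_generate (N:Int) = number_input_question_generate_alt (N:Int) := by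
  simp only [number_input_question_generate, number_input_question_generate_alt]
  have hlen : (PySem.List.pyRange 0 (2*(N:Int)) 1).length = 2*N := by
    rw [PySem.List.length_pyRange_one]; omega
  have hrep : (PySem.List.pyRange 0 (2*(N:Int)) 1).foldl (fun acc _ => acc ++ ["________"]) ["___T____"]
      = "___T____" :: pvRows (fun _ => "________") (fun _ => "________") N := by
    rw [pvFoldl_snoc, hlen, pvReplicate_rows]; rfl
  rw [hrep, pvOuterFold N N (le_refl N)]
  have htop : pvTop N = "___T____" ++ pyStrMul "_" (19 * (N:Int)) := by
    rw [pvTop_eq, pvPlain_pow, pyStrMul, show ((19 * (N:Int))).toNat = 19*N by omega]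
  have hrows : pvRows (fun j => pvAcc pvS1 j N) (fun j => pvAcc pvS2 j N) N
      = (PySem.List.pyRange 0 (N:Int) 1).flatMap (fun j =>
          [ "________" ++ pyStrMul "_" (19 * j) ++ ("___{#T}____" ++ "________") ++ pyStrMul "_" (19 * ((N:Int) - 1 - j)),
            "________" ++ pyStrMul "_" (19 * j) ++ ("___________" ++ "___T____") ++ pyStrMul "_" (19 * ((N:Int) - 1 - j)) ]) := by
    rw [pvFlatMap_pyRange]
    refine pvRows_congr (fun j hj => ⟨?_, ?_⟩) <;>
      · rw [pvAcc_lt _ j N hj, pvPlain_pow, pvPlain_pow, pyStrMul, pyStrMul,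
            show ((19 * ((j:Nat):Int))).toNat = 19*j by omega,
            show ((19 * ((N:Int) - 1 - ((j:Nat):Int)))).toNat = 19*(N-1-j) by omega]
        rfl
  have hout : pvOut N = ["[item]T[/item]"] ++ pyListMul ["[numberinput][answer]T[/answer][/numberinput]", "T"] (N:Int) := by
    rw [pvOut_eq, pyListMul, Int.toNat_natCast]; rfl
  rw [htop, hrows, hout]
  refine congrArg₂ _ (congrArg₂ _ rfl ?_) rfl
  refine congrArg₂ _ ?_ rfl
  exact pvMap_slice_pred _ _ (by simp)

-- ===== VERDICT (by name: the statement is the Claim_ definition above) =====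
theorem number_input_question_generate_spec : Claim_equal_number_input_question_generate := by
  intro n _
  unfold Spec_number_input_question_generate
  by_cases hn : n ≤ 0
  · have h1 : PySem.List.pyRange 0 (2*n) 1 = [] := PySem.List.pyRange_one_eq_nil (by omega)
    have h2 : PySem.List.pyRange 0 n 1 = [] := PySem.List.pyRange_one_eq_nil (by omega)
    have h3 : (19*n).toNat = 0 := by omega
    have h4 : n.toNat = 0 := by omega
    simp [number_input_question_generate, number_input_question_generate_alt, h1, h2,
          pyStrMul, h3, h4, pyListMul, pyStrMulNat]
    decide
  · obtain ⟨N, rfl⟩ : ∃ N : Nat, n = (N:Int) := ⟨n.toNat, by omega⟩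
    exact pvMain_nat N
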